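-- pv_equiv track=rewrite | github.com/DarthBanana/AdventOfCode | 2017/04/solution.py | part1
-- ===== SOURCE A (Python) =====
-- def part1(data):
--     count = 0
--     for line in data:
--         words = line.split()
--         word_set = set(words)
--         if len(words) == len(word_set):
--             count += 1
--     return count
-- ===== SOURCE B (Python) =====
-- def part1(data):
--     count = 0
--     for line in data:
--         w = sorted(line.split())
--         ok = True
--         for prev, cur in zip(w, w[1:]):
--             if prev == cur:
--                 ok = False
--                 break
--         if ok:
--             count += 1
--     return count
-- ===== Notes on version B (the rewrite author's own statement) =====
-- stated objective: alternative
-- what changed: Replaces A's set-construction plus length comparison with sorting each line's words and scanning adjacent pairs (early break) for a duplicate.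
import Mathlib
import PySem

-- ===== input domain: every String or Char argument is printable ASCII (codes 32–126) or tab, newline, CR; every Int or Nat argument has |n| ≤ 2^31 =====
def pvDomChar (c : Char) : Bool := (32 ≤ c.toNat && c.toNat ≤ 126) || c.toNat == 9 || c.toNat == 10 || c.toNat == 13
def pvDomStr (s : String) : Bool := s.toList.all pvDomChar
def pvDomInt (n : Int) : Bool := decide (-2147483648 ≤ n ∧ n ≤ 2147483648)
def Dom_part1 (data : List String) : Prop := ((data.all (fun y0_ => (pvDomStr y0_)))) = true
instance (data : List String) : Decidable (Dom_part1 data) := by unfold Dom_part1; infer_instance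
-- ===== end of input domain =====

-- B replaces A's per-line set construction + length comparison with a sort plus an
-- adjacent-pair scan with early break (alternative decomposition, same results).

-- ===== PORT A =====
def part1 (data : List String) : Int :=
  data.foldl
    (fun count line =>
      let words := PySem.Str.split₀ line
      let wordSet : PySem.Set String := PySem.Set.ofList words
      if words.length = wordSet.length then count + 1 else count)
    0

-- ===== PORT B =====
-- the 'for prev, cur in zip(w, w[1:]): if prev == cur: ok = False; break' loop of Source B
def noAdjDup : List String → Bool
  | [] => true
  | [_] => true
  | a :: b :: t => if a == b then false else noAdjDup (b :: t)

def part1_alt (data : List String) : Int :=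
  data.foldl
    (fun count line =>
      let w := PySem.List.sorted (PySem.Str.split₀ line) (fun x => x) false
      if noAdjDup w then count + 1 else count)
    0

-- ===== PRECONDITION & SPEC =====
def Spec_part1 (data : List String) (out : Int) : Prop := out = part1_alt data
instance (data : List String) (out : Int) : Decidable (Spec_part1 data out) := by unfold Spec_part1; infer_instance

-- ===== CLAIM (what is proved, stated in full; the proofs are below) =====
def Claim_equal_part1 : Prop := ∀ (data : List String), Dom_part1 data → Spec_part1 data (part1 data)

-- ===== LEMMAS AND PROOFS =====

theorem noAdjDup_iff_isChain (l : List String) :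
    noAdjDup l = true ↔ l.IsChain (· ≠ ·) := by
  induction l with
  | nil => simp [noAdjDup]
  | cons a t ih =>
    cases t with
    | nil => simp [noAdjDup]
    | cons b t' =>
      rw [noAdjDup, List.isChain_cons_cons]
      by_cases h : a = b
      · simp [h]
      · simp [h, ih, Ne]

-- Python's len(words) == len(set(words)) says exactly that words has no duplicates
theorem ofList_length_eq_iff (xs : List String) :
    xs.length = (PySem.Set.ofList xs).length ↔ xs.Nodup := by
  constructor
  · intro h
    have hset : (PySem.Set.ofList xs).toFinset = xs.toFinset := by
      ext a
      simp [List.mem_toFinset, PySem.Set.mem_ofList]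
    have hcard : xs.toFinset.card = xs.length := by
      rw [← hset, List.toFinset_card_of_nodup (PySem.Set.nodup_ofList xs), h]
    exact Multiset.toFinset_card_eq_card_iff_nodup.mp (by simpa using hcard)
  · intro h
    rw [PySem.Set.ofList_eq_self_of_nodup xs h]

-- the sorted adjacent-pair scan also says exactly that the original words have no duplicates
theorem noAdjDup_sorted_iff (xs : List String) :
    noAdjDup (PySem.List.sorted xs (fun x => x) false) = true ↔ xs.Nodup := by
  rw [noAdjDup_iff_isChain]
  have hperm := PySem.List.sorted_perm xs (fun x => x) false
  constructor
  · intro hchain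
    have hle : (PySem.List.sorted xs (fun x => x) false).Pairwise (· ≤ ·) :=
      PySem.List.sorted_pairwise xs (fun x => x)
    have hlt : (PySem.List.sorted xs (fun x => x) false).IsChain (· < ·) := by
      have hlec : (PySem.List.sorted xs (fun x => x) false).IsChain (· ≤ ·) := hle.isChain
      generalize (PySem.List.sorted xs (fun x => x) false) = l at hchain hlec ⊢
      induction l with
      | nil => simp
      | cons a t iht =>
        cases t with
        | nil => simp
        | cons b t' =>
          rw [List.isChain_cons_cons] at hchain hlec ⊢
          exact ⟨lt_of_le_of_ne hlec.1 hchain.1, iht hchain.2 hlec.2⟩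
    have : (PySem.List.sorted xs (fun x => x) false).Pairwise (· < ·) :=
      List.isChain_iff_pairwise.mp hlt
    exact hperm.nodup_iff.mp (this.imp ne_of_lt)
  · intro hnd
    exact ((hperm.nodup_iff.mpr hnd) : List.Pairwise (· ≠ ·) _).isChain
theorem step_eq (count : Int) (line : String) :
    (let words := PySem.Str.split₀ line
     let wordSet : PySem.Set String := PySem.Set.ofList words
     if words.length = wordSet.length then count + 1 else count) =
    (let w := PySem.List.sorted (PySem.Str.split₀ line) (fun x => x) false
     if noAdjDup w then count + 1 else count) := by
  simp only []
  apply if_congr _ rfl rfl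
  rw [ofList_length_eq_iff, ← noAdjDup_sorted_iff]

-- ===== VERDICT (by name: the statement is the Claim_ definition above) =====
theorem part1_spec : Claim_equal_part1 := by
  intro data _
  unfold Spec_part1 part1 part1_alt
  congr 1
  funext count line
  exact step_eq count line
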